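-- pv_equiv track=rewrite | github.com/The-King-12345/Advent-of-Code | 2024/day09/main.py | condense_filesystem
-- ===== SOURCE A (Python) =====
-- def condense_filesystem(filesystem: list[str]) -> list[str]:
--     condensed: list[str] = []
--     last_pointer = len(filesystem) - 1
--
--     for i, char in enumerate(filesystem):
--         if i > last_pointer:
--             return condensed
--
--         if char == ".":
--             while filesystem[last_pointer] == ".":
--                 last_pointer -= 1
--                 if i > last_pointer:
--                     return condensed
--
--             condensed.append(filesystem[last_pointer])
--             last_pointer -= 1
--         else:
--             condensed.append(char)
--
--     return condensed
-- ===== SOURCE B (Python) =====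
-- def condense_filesystem(filesystem: list[str]) -> list[str]:
--     """Single forward pass over a precomputed compact list: gaps are filled
--     from the tail of the non-dot list via two indices instead of rescanning
--     the raw filesystem from the back."""
--     compact = [c for c in filesystem if c != "."]
--     out: list[str] = []
--     lo, hi = 0, len(compact) - 1
--     i = 0
--     while lo <= hi:
--         if filesystem[i] != ".":
--             out.append(compact[lo])
--             lo += 1
--         else:
--             out.append(compact[hi])
--             hi -= 1
--         i += 1
--     return out
-- ===== Notes on version B (the rewrite author's own statement) =====
-- stated objective: alternative
-- what changed: B precomputes the compact list of non-dot entries once and fills every gap from that list's tail via two indices (lo/hi) in a single forward pass, instead of A's lazy backward rescanning of the raw filesystem for each gap.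
import Mathlib
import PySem

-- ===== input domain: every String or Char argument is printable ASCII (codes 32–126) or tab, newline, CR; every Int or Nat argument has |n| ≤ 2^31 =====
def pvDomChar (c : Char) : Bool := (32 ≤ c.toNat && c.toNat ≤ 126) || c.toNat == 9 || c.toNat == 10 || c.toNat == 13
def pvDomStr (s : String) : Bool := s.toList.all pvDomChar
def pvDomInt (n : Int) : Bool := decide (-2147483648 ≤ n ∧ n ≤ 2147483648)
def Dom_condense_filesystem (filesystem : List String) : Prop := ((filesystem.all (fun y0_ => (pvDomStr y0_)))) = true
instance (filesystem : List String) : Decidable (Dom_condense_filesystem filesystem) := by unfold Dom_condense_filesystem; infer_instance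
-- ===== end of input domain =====

-- B replaces A's lazy backward rescans of the raw list by one precomputed
-- compact list consumed from both ends (alternative decomposition, same cost).

-- ===== PORT A =====
-- inner `while filesystem[last_pointer] == "."` loop; returns none for the
-- early `return`, some lp for the last_pointer at which the while stops.
-- (the .getD "" default is never used: A only reads indices 0 ≤ lp < len)
def pvWhileA (fs : List String) (i : Nat) (lp : Int) : Option Int :=
  if (PySem.List.pyGet? fs lp).getD "" = "." then
    if h : (i : Int) > lp - 1 then none
    else pvWhileA fs i (lp - 1)
  else some lp
termination_by (lp + 1).toNat
decreasing_by omega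

-- the `for i, char in enumerate(filesystem)` loop, state = last_pointer, acc
def pvGoA (fs : List String) (rest : List String) (i : Nat) (lp : Int)
    (acc : List String) : List String :=
  match rest with
  | [] => acc
  | c :: rest' =>
    if (i : Int) > lp then acc
    else if c = "." then
      match pvWhileA fs i lp with
      | none => acc
      | some lp' =>
        pvGoA fs rest' (i + 1) (lp' - 1) (acc ++ [(PySem.List.pyGet? fs lp').getD ""])
    else pvGoA fs rest' (i + 1) lp (acc ++ [c])

def condense_filesystem (filesystem : List String) : List String :=
  pvGoA filesystem filesystem 0 ((filesystem.length : Int) - 1) []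

-- ===== PORT B =====
-- compact = [c for c in filesystem if c != "."]
def pvNd (l : List String) : List String := l.filter (fun s => s != ".")

-- the `while lo <= hi` loop (the .getD "" defaults are never used: the loop
-- keeps all three indices in range)
def pvGoB (fs L : List String) (i : Nat) (lo hi : Int) (acc : List String) :
    List String :=
  if h : lo ≤ hi then
    if (PySem.List.pyGet? fs (i : Int)).getD "" ≠ "." then
      pvGoB fs L (i + 1) (lo + 1) hi (acc ++ [(PySem.List.pyGet? L lo).getD ""])
    else
      pvGoB fs L (i + 1) lo (hi - 1) (acc ++ [(PySem.List.pyGet? L hi).getD ""])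
  else acc
termination_by (hi + 1 - lo).toNat
decreasing_by all_goals omega

def condense_filesystem_alt (filesystem : List String) : List String :=
  pvGoB filesystem (pvNd filesystem) 0 0 (((pvNd filesystem).length : Int) - 1) []

-- ===== PRECONDITION & SPEC =====
def Spec_condense_filesystem (filesystem : List String) (out : List String) : Prop := out = condense_filesystem_alt filesystem
instance (filesystem : List String) (out : List String) : Decidable (Spec_condense_filesystem filesystem out) := by unfold Spec_condense_filesystem; infer_instance

-- ===== CLAIM (what is proved, stated in full; the proofs are below) =====
def Claim_equal_condense_filesystem : Prop := ∀ (filesystem : List String), Dom_condense_filesystem filesystem → Spec_condense_filesystem filesystem (condense_filesystem filesystem)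

-- ===== LEMMAS AND PROOFS =====

-- number of non-dot entries among the first k positions
def pvCnt (fs : List String) (k : Nat) : Nat := (pvNd (fs.take k)).length

theorem pvCnt_succ_ne (fs : List String) (k : Nat) (hk : k < fs.length)
    (h : fs[k] ≠ ".") : pvCnt fs (k + 1) = pvCnt fs k + 1 := by
  simp only [pvCnt, pvNd, List.take_add_one, List.getElem?_eq_getElem hk,
    Option.toList_some, List.filter_append, List.length_append, List.filter_cons,
    List.filter_nil]
  simp [h]

theorem pvCnt_succ_dot (fs : List String) (k : Nat) (hk : k < fs.length)
    (h : fs[k] = ".") : pvCnt fs (k + 1) = pvCnt fs k := by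
  simp only [pvCnt, pvNd, List.take_add_one, List.getElem?_eq_getElem hk,
    Option.toList_some, List.filter_append, List.length_append, List.filter_cons,
    List.filter_nil]
  simp [h]

theorem pvCnt_mono (fs : List String) {k k' : Nat} (h : k ≤ k') :
    pvCnt fs k ≤ pvCnt fs k' := by
  have hsub : List.Sublist (fs.take k) (fs.take k') := by
    have := (fs.take k').take_sublist k
    rwa [List.take_take, Nat.min_eq_left h] at this
  exact (hsub.filter _).length_le

theorem pvCnt_of_len_le (fs : List String) {k : Nat} (h : fs.length ≤ k) :
    pvCnt fs k = (pvNd fs).length := by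
  simp [pvCnt, List.take_of_length_le h]

theorem pvCnt_le_len (fs : List String) (k : Nat) :
    pvCnt fs k ≤ (pvNd fs).length :=
  ((fs.take_sublist k).filter _).length_le

-- the (pvCnt fs i)-th non-dot entry is fs[i] when fs[i] is non-dot
theorem pvNd_get (fs : List String) {i : Nat} (hi : i < fs.length)
    (h : fs[i] ≠ ".") : (pvNd fs)[pvCnt fs i]? = some fs[i] := by
  conv_lhs => rw [show pvNd fs = pvNd (fs.take i) ++ pvNd (fs.drop i) by
    simp [pvNd, ← List.filter_append]]
  rw [List.drop_eq_getElem_cons hi]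
  have hnd : pvNd (fs[i] :: fs.drop (i + 1)) = fs[i] :: pvNd (fs.drop (i + 1)) := by
    simp only [pvNd, List.filter_cons]
    simp [h]
  rw [hnd, List.getElem?_append_right (by simp [pvCnt])]
  simp [pvCnt]

-- characterisation of the inner while loop of A
theorem pvWhileA_spec (fs : List String) (i : Nat) :
    ∀ k : Nat, i < k → k ≤ fs.length →
      (pvCnt fs k = pvCnt fs i → pvWhileA fs i ((k : Int) - 1) = none) ∧
      (pvCnt fs i < pvCnt fs k → ∃ k' : Nat, i < k' ∧ k' ≤ k ∧
        pvCnt fs k' = pvCnt fs k ∧ pvCnt fs (k' - 1) + 1 = pvCnt fs k' ∧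
        pvWhileA fs i ((k : Int) - 1) = some ((k' : Int) - 1) ∧
        (pvNd fs)[pvCnt fs (k' - 1)]? = PySem.List.pyGet? fs ((k' : Int) - 1)) := by
  intro k
  induction k using Nat.strong_induction_on with
  | _ k IH =>
    intro hik hk
    have hk1 : k - 1 < fs.length := by omega
    have hget : PySem.List.pyGet? fs ((k : Int) - 1) = some fs[k - 1] := by
      have : ((k : Int) - 1) = ((k - 1 : Nat) : Int) := by omega
      rw [this, PySem.List.pyGet?_natCast, List.getElem?_eq_getElem hk1]
    by_cases hdot : fs[k - 1] = "."
    · -- while condition true: decrement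
      have hcnt : pvCnt fs k = pvCnt fs (k - 1) := by
        have hh := pvCnt_succ_dot fs (k - 1) hk1 hdot
        rw [show k - 1 + 1 = k by omega] at hh
        exact hh
      by_cases hstop : (i : Int) > (k : Int) - 1 - 1
      · -- i > lp - 1 after the decrement: early return; forces k = i + 1
        have hki : k = i + 1 := by omega
        have h1 : pvWhileA fs i ((k : Int) - 1) = none := by
          rw [pvWhileA]; simp [hget, hdot, hstop]
        refine ⟨fun _ => h1, fun hlt => absurd hlt ?_⟩
        subst hki
        simp [pvCnt_succ_dot fs i (by omega) (by simpa using hdot)]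
      · have hik' : i < k - 1 := by omega
        have hrec : pvWhileA fs i ((k : Int) - 1) =
            pvWhileA fs i (((k - 1 : Nat) : Int) - 1) := by
          rw [pvWhileA]
          simp only [hget, Option.getD_some, if_pos hdot, dif_neg hstop]
          congr 1; omega
        obtain ⟨H1, H2⟩ := IH (k - 1) (by omega) hik' (by omega)
        constructor
        · intro he
          rw [hrec]; exact H1 (by omega)
        · intro hlt
          obtain ⟨k', h1, h2, h3, h4, h5, h6⟩ := H2 (by omega)
          exact ⟨k', h1, by omega, by omega, h4, by rw [hrec]; exact h5, h6⟩
    · -- while condition false: stop here, lp = k - 1 is a non-dot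
      have hres : pvWhileA fs i ((k : Int) - 1) = some ((k : Int) - 1) := by
        rw [pvWhileA]; simp [hget, hdot]
      have hcnt : pvCnt fs (k - 1) + 1 = pvCnt fs k := by
        have hh := pvCnt_succ_ne fs (k - 1) hk1 hdot
        rw [show k - 1 + 1 = k by omega] at hh
        omega
      constructor
      · intro he
        have := pvCnt_mono fs (show i ≤ k - 1 by omega)
        omega
      · intro _
        exact ⟨k, hik, le_rfl, rfl, hcnt, hres, by
          rw [hget, pvNd_get fs hk1 hdot]⟩

-- fs.drop i = c :: r determines fs[i] and the next drop
theorem pvDrop_cons (fs : List String) {i : Nat} {c : String} {r : List String}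
    (h : fs.drop i = c :: r) :
    i < fs.length ∧ fs[i]'(by
      by_contra hlt
      have : fs.length ≤ i := by omega
      simp [List.drop_eq_nil_of_le this] at h) = c ∧ fs.drop (i + 1) = r := by
  have hi : i < fs.length := by
    by_contra hlt
    have : fs.length ≤ i := by omega
    simp [List.drop_eq_nil_of_le this] at h
  rw [List.drop_eq_getElem_cons hi] at h
  exact ⟨hi, (List.cons.injEq _ _ _ _ ▸ h).1, (List.cons.injEq _ _ _ _ ▸ h).2⟩

-- main simulation: A's loop state (i, lp = k-1) corresponds to B's
-- (i, lo = pvCnt fs i, hi = pvCnt fs k - 1)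
theorem pvMain (fs : List String) :
    ∀ (rest : List String) (i k : Nat) (acc : List String),
      rest = fs.drop i → k ≤ fs.length →
      pvGoA fs rest i ((k : Int) - 1) acc =
        pvGoB fs (pvNd fs) i ((pvCnt fs i : Nat) : Int)
          (((pvCnt fs k : Nat) : Int) - 1) acc := by
  intro rest
  induction rest with
  | nil =>
    intro i k acc hdrop hk
    have hi : fs.length ≤ i := by
      by_contra hlt
      rw [List.drop_eq_getElem_cons (by omega)] at hdrop
      exact (List.cons_ne_nil _ _) hdrop.symm
    have h1 : pvCnt fs i = (pvNd fs).length := pvCnt_of_len_le fs hi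
    have h2 : pvCnt fs k ≤ (pvNd fs).length := pvCnt_le_len fs k
    rw [pvGoA, pvGoB, dif_neg (by omega)]
  | cons c rest' ih =>
    intro i k acc hdrop hk
    obtain ⟨hi, hc, hdrop'⟩ := pvDrop_cons fs hdrop.symm
    have hgetfs : PySem.List.pyGet? fs (i : Int) = some fs[i] := by
      rw [PySem.List.pyGet?_natCast, List.getElem?_eq_getElem hi]
    by_cases hik : (i : Int) > (k : Int) - 1
    · -- A stops (i > lp); then lo ≥ cnt k > hi, B stops too
      have : pvCnt fs k ≤ pvCnt fs i := pvCnt_mono fs (by omega)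
      rw [pvGoA, if_pos hik, pvGoB, dif_neg (by omega)]
    · have hik' : i < k := by omega
      by_cases hdot : c = "."
      · -- gap position
        obtain ⟨H1, H2⟩ := pvWhileA_spec fs i k hik' hk
        by_cases hcc : pvCnt fs i < pvCnt fs k
        · obtain ⟨k', h1, h2, h3, h4, h5, h6⟩ := H2 hcc
          have hk'1 : (1 : Nat) ≤ k' := by omega
          have hcntk1 : pvCnt fs (k' - 1) = pvCnt fs k - 1 := by omega
          -- B takes the else branch
          have hBcond : ¬ ((PySem.List.pyGet? fs (i : Int)).getD "" ≠ ".") := by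
            simp [hgetfs, hc ▸ hdot]
          have hhi : ((pvCnt fs k : Nat) : Int) - 1 = ((pvCnt fs (k' - 1) : Nat) : Int) := by
            omega
          have hstr : (PySem.List.pyGet? (pvNd fs) (((pvCnt fs k : Nat) : Int) - 1)).getD "" =
              (PySem.List.pyGet? fs ((k' : Int) - 1)).getD "" := by
            rw [hhi, PySem.List.pyGet?_natCast, h6]
          rw [pvGoA, if_neg hik, if_pos (hc ▸ hdot), h5,
            pvGoB, dif_pos (by omega), if_neg hBcond, hstr]
          have hrec := ih (i + 1) (k' - 1) (acc ++ [(PySem.List.pyGet? fs ((k' : Int) - 1)).getD ""]) hdrop'.symm (by omega)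
          have e1 : (k' : Int) - 1 - 1 = ((k' - 1 : Nat) : Int) - 1 := by omega
          have e2 : pvCnt fs (i + 1) = pvCnt fs i :=
            pvCnt_succ_dot fs i hi (hc.trans hdot)
          have e3 : ((pvCnt fs (k' - 1) : Nat) : Int) - 1 = ((pvCnt fs k : Nat) : Int) - 1 - 1 := by
            omega
          dsimp only
          rw [e1, hrec, e2, e3]
        · -- no non-dot left in [i, k): both stop
          have he : pvCnt fs k = pvCnt fs i :=
            le_antisymm (by omega) (pvCnt_mono fs (by omega))
          rw [pvGoA, if_neg hik, if_pos (hc ▸ hdot), H1 he,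
            pvGoB, dif_neg (by omega)]
      · -- data position
        have hne : fs[i] ≠ "." := hc ▸ hdot
        have hcnt1 : pvCnt fs (i + 1) = pvCnt fs i + 1 := pvCnt_succ_ne fs i hi hne
        have hcc : pvCnt fs i < pvCnt fs k := by
          have := pvCnt_mono fs (show i + 1 ≤ k by omega)
          omega
        have hBcond : (PySem.List.pyGet? fs (i : Int)).getD "" ≠ "." := by
          simp [hgetfs, hne]
        have hstr : (PySem.List.pyGet? (pvNd fs) ((pvCnt fs i : Nat) : Int)).getD "" = c := by
          rw [PySem.List.pyGet?_natCast, pvNd_get fs hi hne, Option.getD_some, hc]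
        rw [pvGoA, if_neg hik, if_neg hdot,
          pvGoB, dif_pos (by omega), if_pos hBcond, hstr]
        have hrec := ih (i + 1) k (acc ++ [c]) hdrop'.symm hk
        rw [hrec, hcnt1]
        norm_num

-- ===== VERDICT (by name: the statement is the Claim_ definition above) =====
theorem condense_filesystem_spec : Claim_equal_condense_filesystem := by
  intro fs _
  unfold Spec_condense_filesystem condense_filesystem condense_filesystem_alt
  have h := pvMain fs fs 0 fs.length [] (by simp) le_rfl
  have h0 : pvCnt fs 0 = 0 := by simp [pvCnt, pvNd]
  have hl : pvCnt fs fs.length = (pvNd fs).length := pvCnt_of_len_le fs le_rfl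
  rw [h0, hl] at h
  simpa using h
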